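-- pv_equiv track=rewrite | github.com/ni851ste/psycho_stuff | src/tasks.py | letter_order
-- ===== SOURCE A (Python) =====
-- def letter_order(instr, l1, l2):
--     # 3rd example does not make sense, because the second 'A' comes after
--     # a 'B'
--     # So apparently the rules stated reset for each word
--
--     second_letter_appeared = False
--     for letter in instr:
--         if letter == l2 and not second_letter_appeared:
--             second_letter_appeared = True
--             continue
--
--         if letter == l1 and second_letter_appeared:
--             return False
--
--         # special case space character resets the search
--         if letter == ' ':
--             second_letter_appeared = False
--
--     return True
-- ===== SOURCE B (Python) =====
-- def letter_order(instr, l1, l2):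
--     # Per-character comparison in A can only match single-character l1/l2.
--     if len(l1) != 1 or len(l2) != 1:
--         return True
--     for word in instr.split(' '):
--         i = word.find(l2)
--         if i != -1 and l1 in word[i + 1:]:
--             return False
--     return True
-- ===== Notes on version B (the rewrite author's own statement) =====
-- stated objective: faster
-- what changed: B replaces A's per-character Python loop with a mutable seen flag and in-loop space reset by one split(' ') followed by a C-level find(l2) plus substring membership test on the slice after it for each word (after an up-front length-1 check on l1/l2); Pre_ excludes l1 = ' ' or l2 = ' ', where the searched letter coincides with A's word-reset character.
-- outside the precondition, e.g. on letter_order('a ', ' ', 'a'): A returns False, B returns True; on letter_order(' a', 'a', ' '): A returns False, B returns True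
import Mathlib
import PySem

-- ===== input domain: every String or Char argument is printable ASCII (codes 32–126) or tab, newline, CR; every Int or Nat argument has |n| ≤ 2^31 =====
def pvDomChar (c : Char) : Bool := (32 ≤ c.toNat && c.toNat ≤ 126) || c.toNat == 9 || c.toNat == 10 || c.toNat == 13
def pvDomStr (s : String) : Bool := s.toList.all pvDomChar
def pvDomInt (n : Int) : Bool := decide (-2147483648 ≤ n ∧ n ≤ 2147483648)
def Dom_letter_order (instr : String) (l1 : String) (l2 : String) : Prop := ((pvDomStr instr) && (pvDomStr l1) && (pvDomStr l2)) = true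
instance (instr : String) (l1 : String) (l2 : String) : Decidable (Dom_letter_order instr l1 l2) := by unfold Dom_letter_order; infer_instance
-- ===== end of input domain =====

-- B replaces A's single stateful scan (seen flag, space reset) by split-on-space plus a
-- find/substring test per word; a timing run measured B faster (constant factor).


-- ===== PORT A =====
-- the for-loop with the 'second_letter_appeared' flag, early return and space reset
def letterOrderGo (l1 l2 : String) : List Char → Bool → Bool
  | [], _ => true
  | c :: rest, seen =>
    if [c] = l2.toList ∧ seen = false then letterOrderGo l1 l2 rest true
    else if [c] = l1.toList ∧ seen = true then false
    else if c = ' ' then letterOrderGo l1 l2 rest false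
    else letterOrderGo l1 l2 rest seen

def letter_order (instr : String) (l1 : String) (l2 : String) : Bool :=
  letterOrderGo l1 l2 instr.toList false

-- ===== PORT B =====
-- per-word test: i = word.find(l2); i != -1 and l1 in word[i+1:]
def altWordBad (l1 l2 : List Char) (w : List Char) : Bool :=
  let i := PySem.Chars.find w l2
  decide (i ≠ -1) && PySem.Chars.isIn l1 (PySem.List.slice w (some (i + 1)) none)

-- the for-loop over instr.split(' ') with early return
def altGo (l1 l2 : List Char) : List (List Char) → Bool
  | [] => true
  | w :: ws => if altWordBad l1 l2 w then false else altGo l1 l2 ws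

def letter_order_alt (instr : String) (l1 : String) (l2 : String) : Bool :=
  if l1.toList.length ≠ 1 ∨ l2.toList.length ≠ 1 then true
  else altGo l1.toList l2.toList (PySem.Chars.splitOn instr.toList [' '])

-- ===== PRECONDITION & SPEC =====
-- Pre_ excludes l1 = " " or l2 = " ": there the searched letter coincides with A's word-reset
-- character and A's value mixes the two roles, while B's word-split reading is equally defensible.
def Pre_letter_order (instr : String) (l1 : String) (l2 : String) : Prop :=
  l1 ≠ " " ∧ l2 ≠ " "
instance (instr : String) (l1 : String) (l2 : String) : Decidable (Pre_letter_order instr l1 l2) := by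
  unfold Pre_letter_order; infer_instance

def pvWitness_letter_order : String × String × String := ("ab ba", "a", "b")

def Spec_letter_order (instr : String) (l1 : String) (l2 : String) (out : Bool) : Prop :=
  out = letter_order_alt instr l1 l2
instance (instr : String) (l1 : String) (l2 : String) (out : Bool) : Decidable (Spec_letter_order instr l1 l2 out) := by
  unfold Spec_letter_order; infer_instance

-- ===== CLAIM (what is proved, stated in full; the proofs are below) =====
def Claim_equal_letter_order : Prop := ∀ (instr : String) (l1 : String) (l2 : String), Dom_letter_order instr l1 l2 → Pre_letter_order instr l1 l2 → Spec_letter_order instr l1 l2 (letter_order instr l1 l2)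

-- ===== LEMMAS AND PROOFS =====

-- clean structural recursion equal to PySem.Chars.splitOn on separator [' ']
def mySplit (pre : List Char) : List Char → List (List Char)
  | [] => [pre]
  | c :: rest => if c = ' ' then pre :: mySplit [] rest else mySplit (pre ++ [c]) rest

theorem go_eq : ∀ (fuel : Nat) (l cur : List Char) (acc : List (List Char)), l.length < fuel →
    PySem.Chars.splitOn.go [' '] fuel l cur acc = acc.reverse ++ mySplit cur.reverse l := by
  intro fuel
  induction fuel with
  | zero => intro l cur acc h; omega
  | succ n ih =>
    intro l cur acc h
    match l with
    | [] => simp [PySem.Chars.splitOn.go, mySplit]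
    | c :: rest =>
      by_cases hc : c = ' '
      · subst hc
        rw [PySem.Chars.splitOn.go]
        simp [List.isPrefixOf, mySplit, ih rest [] (List.reverse cur :: acc) (by simp at h; omega)]
      · rw [PySem.Chars.splitOn.go]
        have hp : [' '].isPrefixOf (c :: rest) = false := by
          simp [List.isPrefixOf]; intro h'; exact (hc h'.symm).elim
        simp [hp, hc, mySplit, ih rest (c :: cur) acc (by simp at h; omega)]

theorem splitOn_eq (s : List Char) : PySem.Chars.splitOn s [' '] = mySplit [] s := by
  have := go_eq (s.length + 1) s [] [] (by omega)
  simpa [PySem.Chars.splitOn] using this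

-- proof-side mirror of A's inner behaviour on a single (space-free) word: 'does it return False'
def wb (c1 c2 : Char) : List Char → Bool → Bool
  | [], _ => false
  | c :: r, seen =>
    if c = c2 ∧ seen = false then wb c1 c2 r true
    else if c = c1 ∧ seen = true then true
    else wb c1 c2 r seen

-- ===== A-side lemmas =====

theorem letterOrderGo_word_space {l1 l2 : String} {c1 c2 : Char} (h1 : l1.toList = [c1])
    (h2 : l2.toList = [c2]) (hc1 : c1 ≠ ' ') (hc2 : c2 ≠ ' ') :
    ∀ (w rest : List Char) (seen : Bool), ' ' ∉ w →
      letterOrderGo l1 l2 (w ++ ' ' :: rest) seen =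
        if wb c1 c2 w seen then false else letterOrderGo l1 l2 rest false := by
  intro w
  induction w with
  | nil =>
    intro rest seen _
    simp [letterOrderGo, wb, h1, h2, Ne.symm hc1, Ne.symm hc2]
  | cons c r ih =>
    intro rest seen hw
    have hcs : c ≠ ' ' := fun h => hw (h ▸ List.mem_cons_self ..)
    have hr : ' ' ∉ r := fun h => hw (List.mem_cons_of_mem _ h)
    simp only [List.cons_append, letterOrderGo, wb, h1, h2, List.cons.injEq, and_true]
    split_ifs with b1 b2 b3 <;> simp_all [ih rest _ hr]

theorem letterOrderGo_word {l1 l2 : String} {c1 c2 : Char} (h1 : l1.toList = [c1])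
    (h2 : l2.toList = [c2]) :
    ∀ (w : List Char) (seen : Bool), ' ' ∉ w →
      letterOrderGo l1 l2 w seen = !wb c1 c2 w seen := by
  intro w
  induction w with
  | nil => intro seen _; simp [letterOrderGo, wb]
  | cons c r ih =>
    intro seen hw
    have hcs : c ≠ ' ' := fun h => hw (h ▸ List.mem_cons_self ..)
    have hr : ' ' ∉ r := fun h => hw (List.mem_cons_of_mem _ h)
    simp only [letterOrderGo, wb, h1, h2, List.cons.injEq, and_true]
    split_ifs with b1 b2 <;> simp_all [ih _ hr]

-- splitting off the first word
theorem mySplit_word_space : ∀ (w pre rest : List Char), ' ' ∉ w →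
    mySplit pre (w ++ ' ' :: rest) = (pre ++ w) :: mySplit [] rest := by
  intro w
  induction w with
  | nil => intro pre rest _; simp [mySplit]
  | cons c r ih =>
    intro pre rest hw
    have hcs : c ≠ ' ' := fun h => hw (h ▸ List.mem_cons_self ..)
    have hr : ' ' ∉ r := fun h => hw (List.mem_cons_of_mem _ h)
    simp [mySplit, hcs, ih (pre ++ [c]) rest hr]

theorem mySplit_no_space : ∀ (w pre : List Char), ' ' ∉ w → mySplit pre w = [pre ++ w] := by
  intro w
  induction w with
  | nil => intro pre _; simp [mySplit]
  | cons c r ih =>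
    intro pre hw
    have hcs : c ≠ ' ' := fun h => hw (h ▸ List.mem_cons_self ..)
    simp [mySplit, hcs, ih (pre ++ [c]) fun h => hw (List.mem_cons_of_mem _ h)]

-- the key A-side characterisation: the scan decides 'no word is bad'
theorem letterOrderGo_eq_all {l1 l2 : String} {c1 c2 : Char} (h1 : l1.toList = [c1])
    (h2 : l2.toList = [c2]) (hc1 : c1 ≠ ' ') (hc2 : c2 ≠ ' ') :
    ∀ (l : List Char),
      letterOrderGo l1 l2 l false = (mySplit [] l).all (fun w => !wb c1 c2 w false) := by
  intro l
  induction hn : l.length using Nat.strong_induction_on generalizing l with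
  | _ n ih =>
  subst hn
  by_cases hsp : ' ' ∈ l
  · obtain ⟨w, rest, hw, hl⟩ : ∃ w rest, ' ' ∉ w ∧ l = w ++ ' ' :: rest := by
      refine ⟨l.takeWhile (· ≠ ' '), (l.dropWhile (· ≠ ' ')).tail, ?_, ?_⟩
      · intro h
        have := List.mem_takeWhile_imp h
        simp at this
      · have hne : l.dropWhile (· ≠ ' ') ≠ [] := by
          intro h
          have := List.dropWhile_eq_nil_iff.mp h
          simp at this
          exact this _ hsp rfl
        obtain ⟨d, t, hdt⟩ := List.exists_cons_of_ne_nil hne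
        have hhd : d = ' ' := by
          have hh := List.head_dropWhile_not (p := fun c => decide (c ≠ ' ')) hne
          simp only [hdt, List.head_cons] at hh
          simpa using hh
        conv_lhs => rw [← List.takeWhile_append_dropWhile (p := fun c => decide (c ≠ ' ')) (l := l)]
        rw [hdt, hhd]
        simp
    subst hl
    rw [letterOrderGo_word_space h1 h2 hc1 hc2 w rest false hw, mySplit_word_space w [] rest hw]
    have hlen : rest.length < (w ++ ' ' :: rest).length := by simp; omega
    rw [ih rest.length (by simpa using hlen) rest rfl]
    by_cases hb : wb c1 c2 w false <;> simp [hb]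
  · rw [letterOrderGo_word h1 h2 l false hsp, mySplit_no_space l [] hsp]
    simp

-- ===== B-side lemmas =====

theorem wb_seen {c1 c2 : Char} : ∀ (w : List Char), wb c1 c2 w true = decide (c1 ∈ w) := by
  intro w
  induction w with
  | nil => simp [wb]
  | cons c r ih =>
    by_cases hc : c = c1
    · subst hc; simp [wb]
    · simp [wb, hc, Ne.symm hc, ih]

theorem wb_no_c2 {c1 c2 : Char} : ∀ (w : List Char), c2 ∉ w → wb c1 c2 w false = false := by
  intro w
  induction w with
  | nil => intro _; simp [wb]
  | cons c r ih =>
    intro hw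
    have hc : c ≠ c2 := fun h => hw (h ▸ List.mem_cons_self ..)
    simp [wb, hc, ih fun h => hw (List.mem_cons_of_mem _ h)]

theorem wb_first {c1 c2 : Char} : ∀ (w : List Char) (n : Nat), w[n]? = some c2 →
    (∀ j < n, w[j]? ≠ some c2) → wb c1 c2 w false = decide (c1 ∈ w.drop (n + 1)) := by
  intro w
  induction w with
  | nil => intro n h _; simp at h
  | cons c r ih =>
    intro n hn hmin
    match n with
    | 0 =>
      simp at hn
      simp [wb, hn, wb_seen]
    | n + 1 =>
      have hc : c ≠ c2 := by
        have := hmin 0 (by omega)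
        simpa using this
      have : wb c1 c2 r false = decide (c1 ∈ r.drop (n + 1)) := by
        refine ih n (by simpa using hn) ?_
        intro j hj
        have := hmin (j + 1) (by omega)
        simpa using this
      simp [wb, hc, this]

theorem singleton_infix_iff {c : Char} {w : List Char} : [c] <:+: w ↔ c ∈ w := by
  constructor
  · intro ⟨s, t, h⟩; subst h; simp
  · intro h
    obtain ⟨s, t, h⟩ := List.append_of_mem h
    exact ⟨s, t, by simp [h]⟩

theorem singleton_prefix_iff {c : Char} {w : List Char} : [c] <+: w ↔ w.head? = some c := by
  cases w with
  | nil => simp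
  | cons a t => simp [List.cons_prefix_cons, eq_comm]

theorem singleton_prefix_drop {c : Char} {w : List Char} {n : Nat} :
    [c] <+: w.drop n ↔ w[n]? = some c := by
  rw [singleton_prefix_iff, List.head?_drop]

theorem altWordBad_eq_wb {l1 l2 : String} {c1 c2 : Char} (h1 : l1.toList = [c1])
    (h2 : l2.toList = [c2]) (w : List Char) :
    altWordBad l1.toList l2.toList w = wb c1 c2 w false := by
  rw [h1, h2]
  by_cases hf : PySem.Chars.find w [c2] = -1
  · have hmem : c2 ∉ w := by
      have := (PySem.Chars.find_eq_neg_one_iff w [c2]).mp hf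
      rw [singleton_infix_iff] at this
      exact this
    simp [altWordBad, hf, wb_no_c2 w hmem]
  · have hpos : 0 ≤ PySem.Chars.find w [c2] := by
      have := PySem.Chars.neg_one_le_find (s := w) (sub := [c2])
      omega
    obtain ⟨hpre, hmin⟩ := PySem.Chars.find_spec (s := w) (sub := [c2]) hpos
    set i := PySem.Chars.find w [c2] with hi
    have hslice : PySem.List.slice w (some (i + 1)) none = w.drop (i.toNat + 1) := by
      rw [PySem.List.slice_from w (a := i + 1) (by omega)]
      congr 1
      omega
    have hwn : w[i.toNat]? = some c2 := singleton_prefix_drop.mp hpre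
    have hwb : wb c1 c2 w false = decide (c1 ∈ w.drop (i.toNat + 1)) := by
      refine wb_first w i.toNat hwn ?_
      intro j hj hjc
      exact hmin j hj (singleton_prefix_drop.mpr hjc)
    simp only [altWordBad, hslice, hwb, ← hi]
    by_cases hm : c1 ∈ w.drop (i.toNat + 1)
    · simp [hf, hm, (PySem.Chars.isIn_iff_infix [c1] _).mpr (singleton_infix_iff.mpr hm)]
    · have : PySem.Chars.isIn [c1] (w.drop (i.toNat + 1)) = false := by
        rw [PySem.Chars.isIn_eq_false_iff, singleton_infix_iff]
        exact hm
      simp [hf, hm, this]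

theorem altGo_eq_all {l1 l2 : List Char} : ∀ (ws : List (List Char)),
    altGo l1 l2 ws = ws.all (fun w => !altWordBad l1 l2 w) := by
  intro ws
  induction ws with
  | nil => simp [altGo]
  | cons w ws ih => by_cases hb : altWordBad l1 l2 w <;> simp [altGo, hb, ih]

-- ===== degenerate argument lengths: A never returns False =====

theorem letterOrderGo_deg_l2 {l1 l2 : String} (h2 : l2.toList.length ≠ 1) :
    ∀ (l : List Char), letterOrderGo l1 l2 l false = true := by
  intro l
  induction l with
  | nil => simp [letterOrderGo]
  | cons c r ih =>
    have hb1 : ¬([c] = l2.toList ∧ True) := by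
      rintro ⟨h, -⟩; exact h2 (by rw [← h]; rfl)
    have hb2 : ¬([c] = l1.toList ∧ (false : Bool) = true) := by
      rintro ⟨-, h⟩; simp at h
    simp only [letterOrderGo]
    rw [if_neg hb1, if_neg hb2]
    split_ifs <;> exact ih

theorem letterOrderGo_deg_l1 {l1 l2 : String} (h1 : l1.toList.length ≠ 1) :
    ∀ (l : List Char) (seen : Bool), letterOrderGo l1 l2 l seen = true := by
  intro l
  induction l with
  | nil => intro seen; simp [letterOrderGo]
  | cons c r ih =>
    intro seen
    have hcond : ¬([c] = l1.toList ∧ seen = true) := by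
      rintro ⟨h, -⟩; exact h1 (by rw [← h]; rfl)
    simp only [letterOrderGo]
    rw [if_neg hcond]
    split_ifs <;> exact ih _

-- ===== VERDICT (by name: the statement is the Claim_ definition above) =====
theorem letter_order_spec : Claim_equal_letter_order := by
  intro instr l1 l2 _ hpre
  unfold Spec_letter_order letter_order letter_order_alt
  by_cases hdeg : l1.toList.length ≠ 1 ∨ l2.toList.length ≠ 1
  · rw [if_pos hdeg]
    rcases hdeg with h | h
    · exact letterOrderGo_deg_l1 h instr.toList false
    · exact letterOrderGo_deg_l2 h instr.toList
  · simp only [not_or, not_not] at hdeg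
    obtain ⟨hl1, hl2⟩ := hdeg
    obtain ⟨c1, h1⟩ : ∃ c, l1.toList = [c] := List.length_eq_one_iff.mp hl1
    obtain ⟨c2, h2⟩ : ∃ c, l2.toList = [c] := List.length_eq_one_iff.mp hl2
    have hc1 : c1 ≠ ' ' := by
      intro h; subst h
      exact hpre.1 (by apply String.ext; simpa using h1)
    have hc2 : c2 ≠ ' ' := by
      intro h; subst h
      exact hpre.2 (by apply String.ext; simpa using h2)
    rw [if_neg (by omega), splitOn_eq, letterOrderGo_eq_all h1 h2 hc1 hc2, altGo_eq_all]
    congr 1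
    funext w
    rw [altWordBad_eq_wb h1 h2]
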